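-- pv_equiv track=rewrite | github.com/IES-Rafael-Alberti/dawb1-2425-ejercicios-u2-Lmrocio | src/excepciones/ej23_02.py | num_impares
-- ===== SOURCE A (Python) =====
-- def num_impares(num):
--     cadena = ""
--     for i in range(1, num, 1):
--         if i%2 != 0:
--             cadena += str(i)
--         else:
--             cadena += ", "
--     if num%2 != 0:
--         cadena += str(num) + "."
--     else:
--         cadena += "."
--     return cadena
-- ===== SOURCE B (Python) =====
-- def num_impares(num):
--     items = [str(i) for i in range(1, num) if i % 2 != 0]
--     if num % 2 != 0:
--         items.append(str(num))
--     return ", ".join(items) + "."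
-- ===== Notes on version B (the rewrite author's own statement) =====
-- stated objective: idiomatic
-- what changed: B collects the odd values into a list (comprehension over the range plus a final conditional append of num itself) and produces the separators with ', '.join, replacing A's loop over every integer whose even iterations emit ', ' into an accumulating string.
import Mathlib
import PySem

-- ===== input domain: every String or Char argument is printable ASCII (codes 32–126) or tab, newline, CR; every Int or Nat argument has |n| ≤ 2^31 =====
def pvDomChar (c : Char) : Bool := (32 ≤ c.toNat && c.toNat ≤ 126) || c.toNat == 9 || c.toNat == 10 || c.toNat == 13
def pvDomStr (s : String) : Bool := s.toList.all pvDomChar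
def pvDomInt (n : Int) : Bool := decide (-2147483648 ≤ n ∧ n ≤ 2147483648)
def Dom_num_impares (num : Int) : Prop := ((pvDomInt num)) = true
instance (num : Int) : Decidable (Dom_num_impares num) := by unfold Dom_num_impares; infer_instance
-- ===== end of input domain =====

-- B builds the odd values as a list and lets ", ".join produce the separators,
-- instead of A's loop over every integer that emits ", " on each even iteration (objective: idiomatic).

-- ===== PORT A =====
def num_impares (num : Int) : String :=
  let cadena : List Char :=
    (PySem.List.pyRange 1 num 1).foldl
      (fun cadena i =>
        if PySem.Int.mod i 2 ≠ 0 then cadena ++ PySem.Int.toChars i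
        else cadena ++ (", ").toList) []
  let cadena :=
    if PySem.Int.mod num 2 ≠ 0 then cadena ++ (PySem.Int.toChars num ++ (".").toList)
    else cadena ++ (".").toList
  String.ofList cadena

-- ===== PORT B =====
def num_impares_alt (num : Int) : String :=
  let items : List (List Char) :=
    ((PySem.List.pyRange 1 num 1).filter (fun i => PySem.Int.mod i 2 != 0)).map PySem.Int.toChars
  let items := if PySem.Int.mod num 2 ≠ 0 then items ++ [PySem.Int.toChars num] else items
  String.ofList (PySem.Chars.join (", ").toList items ++ (".").toList)

-- ===== PRECONDITION & SPEC =====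
def Spec_num_impares (num : Int) (out : String) : Prop := out = num_impares_alt num
instance (num : Int) (out : String) : Decidable (Spec_num_impares num out) := by unfold Spec_num_impares; infer_instance

-- ===== CLAIM (what is proved, stated in full; the proofs are below) =====
def Claim_equal_num_impares : Prop := ∀ (num : Int), Dom_num_impares num → Spec_num_impares num (num_impares num)

-- ===== LEMMAS AND PROOFS =====

-- A's loop body
def pvStep (c : List Char) (i : Int) : List Char :=
  if PySem.Int.mod i 2 ≠ 0 then c ++ PySem.Int.toChars i else c ++ (", ").toList

def pvF (n : Int) : List Char := (PySem.List.pyRange 1 n 1).foldl pvStep []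

def pvOdds (n : Int) : List (List Char) :=
  ((PySem.List.pyRange 1 n 1).filter (fun i => PySem.Int.mod i 2 != 0)).map PySem.Int.toChars

theorem pvJoin_snoc (sep x : List Char) (l : List (List Char)) (a : List Char) :
    PySem.Chars.join sep (a :: (l ++ [x])) = PySem.Chars.join sep (a :: l) ++ sep ++ x := by
  induction l generalizing a with
  | nil => simp [PySem.Chars.join_cons_cons, PySem.Chars.join_singleton]
  | cons b t ih =>
    rw [List.cons_append, PySem.Chars.join_cons_cons, PySem.Chars.join_cons_cons, ih b]
    simp [List.append_assoc]

theorem pvMain (k : Nat) :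
    pvF (2*(k:Int)+2) = PySem.Chars.join (", ").toList (pvOdds (2*(k:Int)+2)) ∧
      pvOdds (2*(k:Int)+2) ≠ [] := by
  induction k with
  | zero => constructor <;> decide
  | succ k ih =>
    obtain ⟨ihF, ihne⟩ := ih
    simp only [Nat.cast_add, Nat.cast_one]
    rw [show 2*((k:Int)+1)+2 = 2*(k:Int)+4 by ring]
    have hsplit : PySem.List.pyRange 1 (2*(k:Int)+4) 1
        = (PySem.List.pyRange 1 (2*(k:Int)+2) 1 ++ [2*(k:Int)+2]) ++ [2*(k:Int)+3] := by
      rw [show (2*(k:Int)+4) = (2*(k:Int)+3)+1 by ring,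
          PySem.List.pyRange_one_succ_right (by omega : (1:Int) ≤ 2*(k:Int)+3),
          show (2*(k:Int)+3) = (2*(k:Int)+2)+1 by ring,
          PySem.List.pyRange_one_succ_right (by omega : (1:Int) ≤ 2*(k:Int)+2)]
    have heven : PySem.Int.mod (2*(k:Int)+2) 2 = 0 := by
      rw [PySem.Int.mod_eq_zero_iff_dvd]; exact ⟨(k:Int)+1, by ring⟩
    have hodd : PySem.Int.mod (2*(k:Int)+3) 2 ≠ 0 := by
      rw [Ne, PySem.Int.mod_eq_zero_iff_dvd]; omega
    have hF : pvF (2*(k:Int)+4)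
        = pvF (2*(k:Int)+2) ++ (", ").toList ++ PySem.Int.toChars (2*(k:Int)+3) := by
      rw [pvF, hsplit, List.foldl_append, List.foldl_append]
      simp only [List.foldl_cons, List.foldl_nil, pvStep, heven, hodd,
        ne_eq, not_true_eq_false, not_false_eq_true, if_false, if_true]
      rfl
    have hO : pvOdds (2*(k:Int)+4)
        = pvOdds (2*(k:Int)+2) ++ [PySem.Int.toChars (2*(k:Int)+3)] := by
      rw [pvOdds, hsplit, List.filter_append, List.filter_append, List.map_append,
        List.map_append, pvOdds]
      simp
    constructor
    · rw [hF, hO, ihF]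
      obtain ⟨a, l, hal⟩ := List.exists_cons_of_ne_nil ihne
      rw [hal, List.cons_append, pvJoin_snoc]
    · rw [hO]; simp

theorem pvF_odd (k : Nat) :
    pvF (2*(k:Int)+3) = pvF (2*(k:Int)+2) ++ (", ").toList ∧
      pvOdds (2*(k:Int)+3) = pvOdds (2*(k:Int)+2) := by
  have hsplit : PySem.List.pyRange 1 (2*(k:Int)+3) 1
      = PySem.List.pyRange 1 (2*(k:Int)+2) 1 ++ [2*(k:Int)+2] := by
    rw [show (2*(k:Int)+3) = (2*(k:Int)+2)+1 by ring,
        PySem.List.pyRange_one_succ_right (by omega : (1:Int) ≤ 2*(k:Int)+2)]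
  have heven : PySem.Int.mod (2*(k:Int)+2) 2 = 0 := by
    rw [PySem.Int.mod_eq_zero_iff_dvd]; exact ⟨(k:Int)+1, by ring⟩
  constructor
  · rw [pvF, hsplit, List.foldl_append]
    simp only [List.foldl_cons, List.foldl_nil, pvStep, heven,
      ne_eq, not_true_eq_false, if_false]
    rfl
  · rw [pvOdds, hsplit, List.filter_append, List.map_append, pvOdds]
    simp

-- ===== VERDICT (by name: the statement is the Claim_ definition above) =====
theorem num_impares_spec : Claim_equal_num_impares := by
  intro num _
  unfold Spec_num_impares num_impares num_impares_alt
  show String.ofList _ = String.ofList _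
  by_cases hle : num ≤ 1
  · rw [PySem.List.pyRange_one_eq_nil hle]
    by_cases h : PySem.Int.mod num 2 = 0
    · rw [if_neg (not_not_intro h), if_neg (not_not_intro h)]
      simp [PySem.Chars.join_nil]
    · rw [if_pos h, if_pos h]
      simp [PySem.Chars.join_singleton]
  · push Not at hle
    rcases Int.even_or_odd num with ⟨m, hm⟩ | ⟨m, hm⟩
    · -- num even ≥ 2: num = 2k+2
      obtain ⟨k, hk⟩ : ∃ k : Nat, num = 2*(k:Int)+2 := ⟨(m-1).toNat, by omega⟩
      have heven : PySem.Int.mod num 2 = 0 := by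
        rw [PySem.Int.mod_eq_zero_iff_dvd]; exact ⟨m, by omega⟩
      obtain ⟨hF, _⟩ := pvMain k
      rw [if_neg (not_not_intro heven), if_neg (not_not_intro heven), hk]
      rw [show (PySem.List.pyRange 1 (2*(k:Int)+2) 1).foldl
        (fun cadena i => if PySem.Int.mod i 2 ≠ 0 then cadena ++ PySem.Int.toChars i
          else cadena ++ (", ").toList) [] = pvF (2*(k:Int)+2) from rfl, hF]
      rfl
    · -- num odd ≥ 3: num = 2k+3
      obtain ⟨k, hk⟩ : ∃ k : Nat, num = 2*(k:Int)+3 := ⟨(m-1).toNat, by omega⟩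
      have hodd : PySem.Int.mod num 2 ≠ 0 := by
        rw [Ne, PySem.Int.mod_eq_zero_iff_dvd]; omega
      obtain ⟨hF2, hO2⟩ := pvF_odd k
      obtain ⟨hF, hne⟩ := pvMain k
      rw [if_pos hodd, if_pos hodd, hk]
      rw [show (PySem.List.pyRange 1 (2*(k:Int)+3) 1).foldl
        (fun cadena i => if PySem.Int.mod i 2 ≠ 0 then cadena ++ PySem.Int.toChars i
          else cadena ++ (", ").toList) [] = pvF (2*(k:Int)+3) from rfl, hF2, hF]
      rw [show ((PySem.List.pyRange 1 (2*(k:Int)+3) 1).filter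
        (fun i => PySem.Int.mod i 2 != 0)).map PySem.Int.toChars = pvOdds (2*(k:Int)+3) from rfl,
        hO2]
      obtain ⟨a, l, hal⟩ := List.exists_cons_of_ne_nil hne
      rw [hal, List.cons_append, pvJoin_snoc]
      simp [List.append_assoc]
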